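-- pv_equiv track=rewrite | github.com/brinwiththevlin/AML_3 | utils.py | part2_stem
-- ===== SOURCE A (Python) =====
-- from typing import List, Literal, Optional, Dict
--
-- def part2_stem(vocab: List[str]):
--     add = [term for term in vocab if "add" in term]
--     sub = [term for term in vocab if "sub" in term]
--     mul = [term for term in vocab if "mul" in term]
--     div = [term for term in vocab if "div" in term]
--     jump = [term for term in vocab if term.startswith("j")]
--     push = [term for term in vocab if "push" in term]
--     mov = [term for term in vocab if "mov" in term]
--     num = [term for term in vocab if term.isnumeric()]
--
--     new_vocab = {}
--     new_vocab.update(dict.fromkeys(add, "add"))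
--     new_vocab.update(dict.fromkeys(sub, "sub"))
--     new_vocab.update(dict.fromkeys(mul, "mul"))
--     new_vocab.update(dict.fromkeys(div, "div"))
--     new_vocab.update(dict.fromkeys(jump, "jump"))
--     new_vocab.update(dict.fromkeys(push, "push"))
--     new_vocab.update(dict.fromkeys(mov, "mov"))
--     new_vocab.update(dict.fromkeys(num, "num"))
--     return new_vocab
-- ===== SOURCE B (Python) =====
-- CATEGORIES = [
--     ("add", lambda t: "add" in t),
--     ("sub", lambda t: "sub" in t),
--     ("mul", lambda t: "mul" in t),
--     ("div", lambda t: "div" in t),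
--     ("jump", lambda t: t.startswith("j")),
--     ("push", lambda t: "push" in t),
--     ("mov", lambda t: "mov" in t),
--     ("num", lambda t: t.isnumeric()),
-- ]
--
--
-- def part2_stem(vocab):
--     buckets = [[] for _ in CATEGORIES]
--     seen = set()
--     for term in vocab:
--         if term in seen:
--             continue
--         seen.add(term)
--         for i, (_name, pred) in enumerate(CATEGORIES):
--             if pred(term):
--                 buckets[i].append(term)
--                 break
--     return {term: name
--             for (name, _pred), bucket in zip(CATEGORIES, buckets)
--             for term in bucket}
-- ===== Notes on version B (the rewrite author's own statement) =====
-- stated objective: alternative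
-- what changed: One pass that files each term (deduplicated, first occurrence wins) into the bucket of its first matching category, plus one assembling pass over the eight buckets, instead of A's eight full scans of vocab followed by eight dict-update passes; Pre_ excludes vocabularies containing a term that matches more than one category, where A's dict accidentally takes the term's position from its first matching category but its value from the last, and either category is an equally defensible value.
-- outside the precondition, e.g. on part2_stem(['jadd']): A returns {'jadd': 'jump'}, B returns {'jadd': 'add'}; on part2_stem(['addsub']): A returns {'addsub': 'sub'}, B returns {'addsub': 'add'}
import Mathlib
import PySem

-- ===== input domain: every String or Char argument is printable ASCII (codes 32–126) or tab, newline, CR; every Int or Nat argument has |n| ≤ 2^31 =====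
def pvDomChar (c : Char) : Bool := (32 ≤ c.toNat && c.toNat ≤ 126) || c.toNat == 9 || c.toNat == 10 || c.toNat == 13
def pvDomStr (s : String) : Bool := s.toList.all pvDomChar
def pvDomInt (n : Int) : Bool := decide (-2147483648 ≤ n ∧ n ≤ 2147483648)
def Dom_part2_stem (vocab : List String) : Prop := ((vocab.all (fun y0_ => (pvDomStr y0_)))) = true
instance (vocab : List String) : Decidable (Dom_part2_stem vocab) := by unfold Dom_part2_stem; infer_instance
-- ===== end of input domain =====

-- B replaces A's eight full scans of vocab (plus eight dict-building passes) with one pass that files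
-- each term into the bucket of its first matching category, then one assembling pass over the buckets.

-- ===== PORT A =====
-- 'term.isnumeric()' is ported as PySem.Str.strIsdigit: on the printable-ASCII domain isnumeric ≡ isdigit.
-- 'new_vocab.update(dict.fromkeys(xs, v))' is ported as updating with (t, v) for t in xs: duplicate keys
-- overwrite in place with the same value v, which is exactly the net effect of fromkeys-then-update.
def part2_stem (vocab : List String) : List (String × String) :=
  let add := vocab.filter (fun term => PySem.Str.isIn "add" term)
  let sub := vocab.filter (fun term => PySem.Str.isIn "sub" term)
  let mul := vocab.filter (fun term => PySem.Str.isIn "mul" term)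
  let div := vocab.filter (fun term => PySem.Str.isIn "div" term)
  let jump := vocab.filter (fun term => PySem.Str.startswith term "j")
  let push := vocab.filter (fun term => PySem.Str.isIn "push" term)
  let mov := vocab.filter (fun term => PySem.Str.isIn "mov" term)
  let num := vocab.filter (fun term => PySem.Str.strIsdigit term)
  let new_vocab : PySem.Dict String String := PySem.Dict.empty
  let new_vocab := new_vocab.update (add.map (fun t => (t, "add")))
  let new_vocab := new_vocab.update (sub.map (fun t => (t, "sub")))
  let new_vocab := new_vocab.update (mul.map (fun t => (t, "mul")))
  let new_vocab := new_vocab.update (div.map (fun t => (t, "div")))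
  let new_vocab := new_vocab.update (jump.map (fun t => (t, "jump")))
  let new_vocab := new_vocab.update (push.map (fun t => (t, "push")))
  let new_vocab := new_vocab.update (mov.map (fun t => (t, "mov")))
  let new_vocab := new_vocab.update (num.map (fun t => (t, "num")))
  new_vocab.items

-- ===== PORT B =====
-- Source B's ordered category table ('t.isnumeric()' again ported as strIsdigit, exact on ASCII)
def pvCats : List (String × (String → Bool)) :=
  [("add", fun t => PySem.Str.isIn "add" t),
   ("sub", fun t => PySem.Str.isIn "sub" t),
   ("mul", fun t => PySem.Str.isIn "mul" t),
   ("div", fun t => PySem.Str.isIn "div" t),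
   ("jump", fun t => PySem.Str.startswith t "j"),
   ("push", fun t => PySem.Str.isIn "push" t),
   ("mov", fun t => PySem.Str.isIn "mov" t),
   ("num", fun t => PySem.Str.strIsdigit t)]

-- the body of Source B's 'for term in vocab' loop; the inner 'for i, (_name, pred) in enumerate(...): if
-- pred(term): ...; break' is the first hit of the enumerated table, i.e. find?
def pvBStep (st : PySem.Set String × List (List String)) (term : String) :
    PySem.Set String × List (List String) :=
  if PySem.Set.contains st.1 term then st
  else
    let seen := PySem.Set.add st.1 term
    match (PySem.List.enumerate pvCats 0).find? (fun c => c.2.2 term) with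
    | some c => (seen, PySem.List.pySetD st.2 c.1 (PySem.List.pyGetD st.2 c.1 [] ++ [term]))
    | none => (seen, st.2)

def part2_stem_alt (vocab : List String) : List (String × String) :=
  let st := vocab.foldl pvBStep (PySem.Set.empty, pvCats.map (fun _ => ([] : List String)))
  let d := (pvCats.zip st.2).foldl
    (fun d cb => cb.2.foldl (fun d t => PySem.Dict.insert d t cb.1.1) d)
    (PySem.Dict.empty : PySem.Dict String String)
  d.items

-- ===== PRECONDITION & SPEC =====
-- the eight category predicates, by position, and how many of them a term matches
def pvP : Nat → String → Bool
  | 0, t => PySem.Str.isIn "add" t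
  | 1, t => PySem.Str.isIn "sub" t
  | 2, t => PySem.Str.isIn "mul" t
  | 3, t => PySem.Str.isIn "div" t
  | 4, t => PySem.Str.startswith t "j"
  | 5, t => PySem.Str.isIn "push" t
  | 6, t => PySem.Str.isIn "mov" t
  | 7, t => PySem.Str.strIsdigit t
  | _, _ => false

def pvCnt (t : String) : Nat :=
  (if pvP 0 t then 1 else 0) + (if pvP 1 t then 1 else 0) + (if pvP 2 t then 1 else 0) +
  (if pvP 3 t then 1 else 0) + (if pvP 4 t then 1 else 0) + (if pvP 5 t then 1 else 0) +
  (if pvP 6 t then 1 else 0) + (if pvP 7 t then 1 else 0)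

-- Pre_ excludes vocabularies containing a term that matches more than one category: on those A's dict
-- accidentally takes the term's position from its first matching category but its value from the last
-- (an artefact of the eight-update construction), and either category is an equally defensible value.
def Pre_part2_stem (vocab : List String) : Prop := ∀ t ∈ vocab, pvCnt t ≤ 1
instance (vocab : List String) : Decidable (Pre_part2_stem vocab) := by unfold Pre_part2_stem; infer_instance

def pvWitness_part2_stem : List String := ["add", "jmp", "7", "xx"]

def Spec_part2_stem (vocab : List String) (out : List (String × String)) : Prop := out = part2_stem_alt vocab
instance (vocab : List String) (out : List (String × String)) : Decidable (Spec_part2_stem vocab out) := by unfold Spec_part2_stem; infer_instance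

-- ===== CLAIM (what is proved, stated in full; the proofs are below) =====
def Claim_equal_part2_stem : Prop := ∀ (vocab : List String), Dom_part2_stem vocab → Pre_part2_stem vocab → Spec_part2_stem vocab (part2_stem vocab)

-- ===== LEMMAS AND PROOFS =====

-- proof-side vocabulary ------------------------------------------------------
def pvName : Nat → String
  | 0 => "add" | 1 => "sub" | 2 => "mul" | 3 => "div"
  | 4 => "jump" | 5 => "push" | 6 => "mov" | _ => "num"

-- index of a term's first matching category
def pvFirst? (t : String) : Option Nat :=
  if pvP 0 t then some 0 else if pvP 1 t then some 1 else if pvP 2 t then some 2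
  else if pvP 3 t then some 3 else if pvP 4 t then some 4 else if pvP 5 t then some 5
  else if pvP 6 t then some 6 else if pvP 7 t then some 7 else none

-- bucket i after Source B's distribution loop has consumed the list p
def pvB (p : List String) (i : Nat) : List String :=
  (PySem.List.dedup p).filter (fun t => pvFirst? t == some i)

-- the whole loop state after consuming p
def pvSt (p : List String) : PySem.Set String × List (List String) :=
  (PySem.Set.ofList p, [pvB p 0, pvB p 1, pvB p 2, pvB p 3, pvB p 4, pvB p 5, pvB p 6, pvB p 7])

-- the value A's last-update-wins lookup assigns to a key
def pvVal (vocab : List String) (k : String) : String :=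
  if k ∈ vocab.filter (fun term => PySem.Str.strIsdigit term) then "num"
  else if k ∈ vocab.filter (fun term => PySem.Str.isIn "mov" term) then "mov"
  else if k ∈ vocab.filter (fun term => PySem.Str.isIn "push" term) then "push"
  else if k ∈ vocab.filter (fun term => PySem.Str.startswith term "j") then "jump"
  else if k ∈ vocab.filter (fun term => PySem.Str.isIn "div" term) then "div"
  else if k ∈ vocab.filter (fun term => PySem.Str.isIn "mul" term) then "mul"
  else if k ∈ vocab.filter (fun term => PySem.Str.isIn "sub" term) then "sub"
  else if k ∈ vocab.filter (fun term => PySem.Str.isIn "add" term) then "add"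
  else ""

-- dedup toolbox --------------------------------------------------------------
lemma dedup_cons {α : Type} [BEq α] [LawfulBEq α] [DecidableEq α] (x : α) (l : List α) :
    PySem.List.dedup (x :: l) = x :: (PySem.List.dedup l).filter (fun y => !decide (y = x)) := by
  have h : x :: l = [x] ++ l := rfl
  rw [h]
  simp only [PySem.List.dedup_eq_ofList, PySem.Set.ofList_append, PySem.Set.update_eq_append_filter]
  have h2 : PySem.Set.ofList [x] = [x] := by rfl
  rw [h2]
  simp

lemma dedup_filter {α : Type} [BEq α] [LawfulBEq α] [DecidableEq α] (p : α → Bool) (l : List α) :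
    PySem.List.dedup (l.filter p) = (PySem.List.dedup l).filter p := by
  induction l with
  | nil => simp
  | cons x l ih =>
    by_cases hp : p x
    · rw [List.filter_cons_of_pos hp, dedup_cons, dedup_cons, List.filter_cons_of_pos hp, ih,
        List.filter_comm]
    · rw [List.filter_cons_of_neg hp, dedup_cons, List.filter_cons_of_neg hp, ih,
        List.filter_filter]
      refine (List.filter_congr ?_).symm
      intro a _
      by_cases hpa : p a
      · have : a ≠ x := fun he => hp (he ▸ hpa)
        simp [hpa, this]
      · simp [hpa]

lemma dedup_append {α : Type} [BEq α] [LawfulBEq α] [DecidableEq α] (a b : List α) :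
    PySem.List.dedup (a ++ b)
      = PySem.List.dedup a ++ (PySem.List.dedup b).filter (fun y => !decide (y ∈ a)) := by
  simp only [PySem.List.dedup_eq_ofList, PySem.Set.ofList_append, PySem.Set.update_eq_append_filter]
  congr 1
  refine List.filter_congr ?_
  intro y _
  by_cases hy : y ∈ a <;> simp [hy, PySem.Set.mem_ofList]

lemma dedup_append_singleton_mem {α : Type} [BEq α] [LawfulBEq α] {x : α} {l : List α} (h : x ∈ l) :
    PySem.List.dedup (l ++ [x]) = PySem.List.dedup l := by
  simp only [PySem.List.dedup_eq_ofList, PySem.Set.ofList_append, PySem.Set.update_eq_append_filter]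
  have h1 : PySem.Set.ofList [x] = [x] := rfl
  rw [h1]
  simp [List.filter_cons]
  exact h

lemma dedup_append_singleton_not_mem {α : Type} [BEq α] [LawfulBEq α] {x : α} {l : List α} (h : x ∉ l) :
    PySem.List.dedup (l ++ [x]) = PySem.List.dedup l ++ [x] := by
  simp only [PySem.List.dedup_eq_ofList, PySem.Set.ofList_append, PySem.Set.update_eq_append_filter]
  have h1 : PySem.Set.ofList [x] = [x] := rfl
  rw [h1]
  simp [List.filter_cons]
  exact h

lemma pvPeel (vocab tail : List String) (p q : String → Bool) (ht : ∀ x ∈ tail, x ∈ vocab) :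
    (PySem.List.dedup (vocab.filter p ++ tail)).filter q
      = (PySem.List.dedup vocab).filter (fun t => p t && q t)
        ++ (PySem.List.dedup tail).filter (fun t => !p t && q t) := by
  rw [dedup_append, List.filter_append, dedup_filter, List.filter_filter, List.filter_filter]
  congr 1
  · exact List.filter_congr (fun a _ => by rw [Bool.and_comm])
  · refine List.filter_congr ?_
    intro y hy
    have hyt : y ∈ tail := (PySem.List.mem_dedup tail y).1 hy
    have hyv : y ∈ vocab := ht y hyt
    by_cases hp : p y <;> simp [List.mem_filter, hp, hyv]

-- A-side ---------------------------------------------------------------------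
lemma getD_update_const (xs : List String) (v : String) (d : PySem.Dict String String) (k dflt : String) :
    (d.update (xs.map (fun t => (t, v)))).getD k dflt = if k ∈ xs then v else d.getD k dflt := by
  induction xs generalizing d with
  | nil => simp [show d.update [] = d from rfl]
  | cons x xs ih =>
    have hstep : d.update ((x :: xs).map (fun t => (t, v)))
        = (d.insert x v).update (xs.map (fun t => (t, v))) := rfl
    rw [hstep, ih]
    by_cases hk : k ∈ xs
    · simp [hk]
    · by_cases hkx : k = x <;> simp [hk, hkx, PySem.Dict.getD_insert]

lemma keys_update_const (xs : List String) (v : String) (d : PySem.Dict String String) :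
    (d.update (xs.map (fun t => (t, v)))).keys = PySem.Set.update d.keys xs := by
  have h := PySem.Dict.keys_foldl_insert_key (ν := String) (xs.map (fun t => (t, v)))
    Prod.fst (fun _ x => x.2) d
  simp only [List.map_map] at h
  simpa [PySem.Dict.update, Function.comp_def] using h

lemma nodup_keys_update_const (xs : List String) (v : String) (d : PySem.Dict String String)
    (h : d.keys.Nodup) : (d.update (xs.map (fun t => (t, v)))).keys.Nodup := by
  exact PySem.Dict.nodup_keys_foldl_insert_key (xs.map (fun t => (t, v))) Prod.fst (fun _ x => x.2) d h

lemma A_norm (vocab : List String) :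
    part2_stem vocab
      = (PySem.List.dedup
          (vocab.filter (fun term => PySem.Str.isIn "add" term)
            ++ (vocab.filter (fun term => PySem.Str.isIn "sub" term)
            ++ (vocab.filter (fun term => PySem.Str.isIn "mul" term)
            ++ (vocab.filter (fun term => PySem.Str.isIn "div" term)
            ++ (vocab.filter (fun term => PySem.Str.startswith term "j")
            ++ (vocab.filter (fun term => PySem.Str.isIn "push" term)
            ++ (vocab.filter (fun term => PySem.Str.isIn "mov" term)
            ++ vocab.filter (fun term => PySem.Str.strIsdigit term))))))))).map
          (fun k => (k, pvVal vocab k)) := by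
  unfold part2_stem
  rw [PySem.Dict.items_eq_map_keys _ (by
      apply nodup_keys_update_const; apply nodup_keys_update_const; apply nodup_keys_update_const
      apply nodup_keys_update_const; apply nodup_keys_update_const; apply nodup_keys_update_const
      apply nodup_keys_update_const; apply nodup_keys_update_const
      simp [PySem.Dict.keys_empty]) ""]
  rw [keys_update_const, keys_update_const, keys_update_const, keys_update_const,
      keys_update_const, keys_update_const, keys_update_const, keys_update_const]
  simp only [PySem.Dict.keys_empty]
  have hkeys : ∀ (a b : List String), PySem.Set.update (PySem.Set.ofList a) b = PySem.Set.ofList (a ++ b) := by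
    intro a b; simp [PySem.Set.ofList_append]
  rw [show PySem.Set.update ([] : PySem.Set String) (vocab.filter (fun term => PySem.Str.isIn "add" term)) = PySem.Set.ofList (vocab.filter (fun term => PySem.Str.isIn "add" term)) from rfl]
  rw [hkeys, hkeys, hkeys, hkeys, hkeys, hkeys, hkeys]
  simp only [List.append_assoc, PySem.List.dedup_eq_ofList]
  refine List.map_congr_left ?_
  intro k hk
  rw [getD_update_const, getD_update_const, getD_update_const, getD_update_const,
      getD_update_const, getD_update_const, getD_update_const, getD_update_const]
  simp only [pvVal, PySem.Dict.getD_empty]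


-- B-side ---------------------------------------------------------------------
lemma pvStep_state (p : List String) (x : String) : pvBStep (pvSt p) x = pvSt (p ++ [x]) := by
  by_cases hx : x ∈ p
  · have h1 : pvSt (p ++ [x]) = pvSt p := by
      simp [pvSt, pvB, ← PySem.List.dedup_eq_ofList, dedup_append_singleton_mem hx]
    have hc : PySem.Set.contains (pvSt p).1 x = true := by
      simp [pvSt, PySem.Set.mem_ofList, hx]
    rw [h1]
    simp only [pvBStep, hc, if_true]
  · have hcond : PySem.Set.contains (PySem.Set.ofList p) x = false := by
      simp [PySem.Set.mem_ofList, hx]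
    have hded : PySem.Set.ofList (p ++ [x]) = PySem.Set.ofList p ++ [x] := by
      simpa using dedup_append_singleton_not_mem hx
    have hadd : PySem.Set.add (PySem.Set.ofList p) x = PySem.Set.ofList (p ++ [x]) := by
      simp only [PySem.Set.add]
      rw [if_neg (by simpa [PySem.Set.contains_iff] using hcond)]
      exact hded.symm
    by_cases h0 : pvP 0 x
    · simp only [pvP] at h0
      simp at h0
      have hfx : pvFirst? x = some 0 := by simp [pvFirst?, pvP, h0]
      have hfind : (PySem.List.enumerate pvCats 0).find? (fun c => c.2.2 x)
          = some ((0 : Int), ("add", fun t => PySem.Str.isIn "add" t)) := by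
        simp [pvCats, PySem.List.enumerate_cons, h0]
      have hB : ∀ i : Nat, pvB (p ++ [x]) i = pvB p i ++ (if 0 = i then [x] else []) := by
        intro i
        rcases eq_or_ne (0 : Nat) i with hij | hij
        · subst hij
          simp [pvB, hded, List.filter_append, hfx]
        · simp [pvB, hded, List.filter_append, hfx, hij]
      simp only [pvBStep, pvSt, hcond, Bool.false_eq_true, if_false, hfind]
      refine Prod.ext (by simpa [pvSt, hx] using hadd) ?_
      simp [hB, PySem.List.pySetD, PySem.List.pySet?, PySem.List.pyGetD, PySem.List.pyGet?,
        PySem.List.pyIdx?]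
    by_cases h1 : pvP 1 x
    · simp only [pvP] at h0 h1
      simp at h0 h1
      have hfx : pvFirst? x = some 1 := by simp [pvFirst?, pvP, h0, h1]
      have hfind : (PySem.List.enumerate pvCats 0).find? (fun c => c.2.2 x)
          = some ((1 : Int), ("sub", fun t => PySem.Str.isIn "sub" t)) := by
        simp [pvCats, PySem.List.enumerate_cons, List.find?, h0, h1]
      have hB : ∀ i : Nat, pvB (p ++ [x]) i = pvB p i ++ (if 1 = i then [x] else []) := by
        intro i
        rcases eq_or_ne (1 : Nat) i with hij | hij
        · subst hij
          simp [pvB, hded, List.filter_append, hfx]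
        · simp [pvB, hded, List.filter_append, hfx, hij]
      simp only [pvBStep, pvSt, hcond, Bool.false_eq_true, if_false, hfind]
      refine Prod.ext (by simpa [pvSt, hx] using hadd) ?_
      simp [hB, PySem.List.pySetD, PySem.List.pySet?, PySem.List.pyGetD, PySem.List.pyGet?,
        PySem.List.pyIdx?]
    by_cases h2 : pvP 2 x
    · simp only [pvP] at h0 h1 h2
      simp at h0 h1 h2
      have hfx : pvFirst? x = some 2 := by simp [pvFirst?, pvP, h0, h1, h2]
      have hfind : (PySem.List.enumerate pvCats 0).find? (fun c => c.2.2 x)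
          = some ((2 : Int), ("mul", fun t => PySem.Str.isIn "mul" t)) := by
        simp [pvCats, PySem.List.enumerate_cons, List.find?, h0, h1, h2]
      have hB : ∀ i : Nat, pvB (p ++ [x]) i = pvB p i ++ (if 2 = i then [x] else []) := by
        intro i
        rcases eq_or_ne (2 : Nat) i with hij | hij
        · subst hij
          simp [pvB, hded, List.filter_append, hfx]
        · simp [pvB, hded, List.filter_append, hfx, hij]
      simp only [pvBStep, pvSt, hcond, Bool.false_eq_true, if_false, hfind]
      refine Prod.ext (by simpa [pvSt, hx] using hadd) ?_
      simp [hB, PySem.List.pySetD, PySem.List.pySet?, PySem.List.pyGetD, PySem.List.pyGet?,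
        PySem.List.pyIdx?]
    by_cases h3 : pvP 3 x
    · simp only [pvP] at h0 h1 h2 h3
      simp at h0 h1 h2 h3
      have hfx : pvFirst? x = some 3 := by simp [pvFirst?, pvP, h0, h1, h2, h3]
      have hfind : (PySem.List.enumerate pvCats 0).find? (fun c => c.2.2 x)
          = some ((3 : Int), ("div", fun t => PySem.Str.isIn "div" t)) := by
        simp [pvCats, PySem.List.enumerate_cons, List.find?, h0, h1, h2, h3]
      have hB : ∀ i : Nat, pvB (p ++ [x]) i = pvB p i ++ (if 3 = i then [x] else []) := by
        intro i
        rcases eq_or_ne (3 : Nat) i with hij | hij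
        · subst hij
          simp [pvB, hded, List.filter_append, hfx]
        · simp [pvB, hded, List.filter_append, hfx, hij]
      simp only [pvBStep, pvSt, hcond, Bool.false_eq_true, if_false, hfind]
      refine Prod.ext (by simpa [pvSt, hx] using hadd) ?_
      simp [hB, PySem.List.pySetD, PySem.List.pySet?, PySem.List.pyGetD, PySem.List.pyGet?,
        PySem.List.pyIdx?]
    by_cases h4 : pvP 4 x
    · simp only [pvP] at h0 h1 h2 h3 h4
      simp at h0 h1 h2 h3 h4
      have hfx : pvFirst? x = some 4 := by simp [pvFirst?, pvP, h0, h1, h2, h3, h4]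
      have hfind : (PySem.List.enumerate pvCats 0).find? (fun c => c.2.2 x)
          = some ((4 : Int), ("jump", fun t => PySem.Str.startswith t "j")) := by
        simp [pvCats, PySem.List.enumerate_cons, List.find?, h0, h1, h2, h3, h4]
      have hB : ∀ i : Nat, pvB (p ++ [x]) i = pvB p i ++ (if 4 = i then [x] else []) := by
        intro i
        rcases eq_or_ne (4 : Nat) i with hij | hij
        · subst hij
          simp [pvB, hded, List.filter_append, hfx]
        · simp [pvB, hded, List.filter_append, hfx, hij]
      simp only [pvBStep, pvSt, hcond, Bool.false_eq_true, if_false, hfind]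
      refine Prod.ext (by simpa [pvSt, hx] using hadd) ?_
      simp [hB, PySem.List.pySetD, PySem.List.pySet?, PySem.List.pyGetD, PySem.List.pyGet?,
        PySem.List.pyIdx?]
    by_cases h5 : pvP 5 x
    · simp only [pvP] at h0 h1 h2 h3 h4 h5
      simp at h0 h1 h2 h3 h4 h5
      have hfx : pvFirst? x = some 5 := by simp [pvFirst?, pvP, h0, h1, h2, h3, h4, h5]
      have hfind : (PySem.List.enumerate pvCats 0).find? (fun c => c.2.2 x)
          = some ((5 : Int), ("push", fun t => PySem.Str.isIn "push" t)) := by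
        simp [pvCats, PySem.List.enumerate_cons, List.find?, h0, h1, h2, h3, h4, h5]
      have hB : ∀ i : Nat, pvB (p ++ [x]) i = pvB p i ++ (if 5 = i then [x] else []) := by
        intro i
        rcases eq_or_ne (5 : Nat) i with hij | hij
        · subst hij
          simp [pvB, hded, List.filter_append, hfx]
        · simp [pvB, hded, List.filter_append, hfx, hij]
      simp only [pvBStep, pvSt, hcond, Bool.false_eq_true, if_false, hfind]
      refine Prod.ext (by simpa [pvSt, hx] using hadd) ?_
      simp [hB, PySem.List.pySetD, PySem.List.pySet?, PySem.List.pyGetD, PySem.List.pyGet?,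
        PySem.List.pyIdx?]
    by_cases h6 : pvP 6 x
    · simp only [pvP] at h0 h1 h2 h3 h4 h5 h6
      simp at h0 h1 h2 h3 h4 h5 h6
      have hfx : pvFirst? x = some 6 := by simp [pvFirst?, pvP, h0, h1, h2, h3, h4, h5, h6]
      have hfind : (PySem.List.enumerate pvCats 0).find? (fun c => c.2.2 x)
          = some ((6 : Int), ("mov", fun t => PySem.Str.isIn "mov" t)) := by
        simp [pvCats, PySem.List.enumerate_cons, List.find?, h0, h1, h2, h3, h4, h5, h6]
      have hB : ∀ i : Nat, pvB (p ++ [x]) i = pvB p i ++ (if 6 = i then [x] else []) := by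
        intro i
        rcases eq_or_ne (6 : Nat) i with hij | hij
        · subst hij
          simp [pvB, hded, List.filter_append, hfx]
        · simp [pvB, hded, List.filter_append, hfx, hij]
      simp only [pvBStep, pvSt, hcond, Bool.false_eq_true, if_false, hfind]
      refine Prod.ext (by simpa [pvSt, hx] using hadd) ?_
      simp [hB, PySem.List.pySetD, PySem.List.pySet?, PySem.List.pyGetD, PySem.List.pyGet?,
        PySem.List.pyIdx?]
    by_cases h7 : pvP 7 x
    · simp only [pvP] at h0 h1 h2 h3 h4 h5 h6 h7
      simp at h0 h1 h2 h3 h4 h5 h6 h7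
      have hfx : pvFirst? x = some 7 := by simp [pvFirst?, pvP, h0, h1, h2, h3, h4, h5, h6, h7]
      have hfind : (PySem.List.enumerate pvCats 0).find? (fun c => c.2.2 x)
          = some ((7 : Int), ("num", fun t => PySem.Str.strIsdigit t)) := by
        simp [pvCats, PySem.List.enumerate_cons, List.find?, h0, h1, h2, h3, h4, h5, h6, h7]
      have hB : ∀ i : Nat, pvB (p ++ [x]) i = pvB p i ++ (if 7 = i then [x] else []) := by
        intro i
        rcases eq_or_ne (7 : Nat) i with hij | hij
        · subst hij
          simp [pvB, hded, List.filter_append, hfx]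
        · simp [pvB, hded, List.filter_append, hfx, hij]
      simp only [pvBStep, pvSt, hcond, Bool.false_eq_true, if_false, hfind]
      refine Prod.ext (by simpa [pvSt, hx] using hadd) ?_
      simp [hB, PySem.List.pySetD, PySem.List.pySet?, PySem.List.pyGetD, PySem.List.pyGet?,
        PySem.List.pyIdx?]
    simp only [pvP] at h0 h1 h2 h3 h4 h5 h6 h7
    simp at h0 h1 h2 h3 h4 h5 h6 h7
    have hfx : pvFirst? x = none := by simp [pvFirst?, pvP, h0, h1, h2, h3, h4, h5, h6, h7]
    have hfind : (PySem.List.enumerate pvCats 0).find? (fun c => c.2.2 x) = none := by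
      simp [pvCats, PySem.List.enumerate_cons, List.find?, h0, h1, h2, h3, h4, h5, h6, h7]
    have hB : ∀ i : Nat, pvB (p ++ [x]) i = pvB p i := by
      intro i
      simp [pvB, hded, List.filter_append, hfx]
    simp only [pvBStep, pvSt, hcond, Bool.false_eq_true, if_false, hfind]
    exact Prod.ext (by simpa [pvSt, hx] using hadd) (by simp [hB])

lemma pvLoop (vs : List String) : ∀ p : List String,
    vs.foldl pvBStep (pvSt p) = pvSt (p ++ vs) := by
  intro p
  induction vs generalizing p with
  | nil => simp
  | cons v vs ih => simpa [pvStep_state] using ih (p ++ [v])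

lemma bucket_fold (d : PySem.Dict String String) (xs : List String) (v : String)
    (hnd : xs.Nodup) (hfresh : ∀ t ∈ xs, d.contains t = false) :
    (xs.foldl (fun d t => PySem.Dict.insert d t v) d).items = d.items ++ xs.map (fun t => (t, v)) := by
  simpa using PySem.Dict.items_foldl_insert_fresh (l := xs) (k := fun t => t) (v := fun _ => v)
    (d := d) hfresh (by simpa using hnd)

lemma fold_zip_items (l : List ((String × (String → Bool)) × List String))
    (d : PySem.Dict String String) (h : (d.keys ++ l.flatMap (·.2)).Nodup) :
    (l.foldl (fun d cb => cb.2.foldl (fun d t => PySem.Dict.insert d t cb.1.1) d) d).items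
      = d.items ++ l.flatMap (fun cb => cb.2.map (fun t => (t, cb.1.1))) := by
  induction l generalizing d with
  | nil => simp
  | cons cb l ih =>
    simp only [List.foldl_cons, List.flatMap_cons] at *
    have hnd : cb.2.Nodup := by
      have := h.sublist (List.sublist_append_right _ _)
      exact (this.sublist (List.sublist_append_left _ _))
    have hfresh : ∀ t ∈ cb.2, d.contains t = false := by
      intro t ht
      rw [Bool.eq_false_iff]
      intro hc
      have hkeys : t ∈ d.keys := (PySem.Dict.contains_iff_mem_keys _ _).1 hc
      rcases (List.nodup_append.1 h) with ⟨-, -, hdis⟩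
      exact hdis t hkeys t (by simp [ht]) rfl
    have hstep := bucket_fold d cb.2 cb.1.1 hnd hfresh
    have hkeys' : (cb.2.foldl (fun d t => PySem.Dict.insert d t cb.1.1) d).keys = d.keys ++ cb.2 := by
      have : (cb.2.foldl (fun d t => PySem.Dict.insert d t cb.1.1) d).keys
          = ((cb.2.foldl (fun d t => PySem.Dict.insert d t cb.1.1) d).items).map Prod.fst := rfl
      rw [this, hstep]
      simp [PySem.Dict.keys, Function.comp_def]
    rw [ih _ (by rw [hkeys']; simpa [List.append_assoc] using h), hstep]
    simp

-- mutually disjoint buckets concatenate to a duplicate-free list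
lemma pvB_flat_nodup (vocab : List String) (is : List Nat) (his : is.Nodup) :
    (is.flatMap (pvB vocab)).Nodup := by
  induction is with
  | nil => simp
  | cons i is ih =>
    simp only [List.flatMap_cons]
    rw [List.nodup_append]
    refine ⟨(PySem.List.nodup_dedup vocab).filter _, ih his.of_cons, ?_⟩
    intro t ht t' ht' he
    subst he
    rcases List.mem_flatMap.1 ht' with ⟨j, hj, htj⟩
    have hi : pvFirst? t = some i := by
      have := (List.mem_filter.1 ht).2; simpa using this
    have hjv : pvFirst? t = some j := by
      have := (List.mem_filter.1 htj).2; simpa using this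
    have : i = j := by rw [hi] at hjv; exact (Option.some_inj.1 hjv)
    subst this
    exact (List.nodup_cons.1 his).1 hj

lemma B_norm (vocab : List String) :
    part2_stem_alt vocab
      = (pvB vocab 0).map (fun t => (t, "add")) ++ ((pvB vocab 1).map (fun t => (t, "sub"))
        ++ ((pvB vocab 2).map (fun t => (t, "mul")) ++ ((pvB vocab 3).map (fun t => (t, "div"))
        ++ ((pvB vocab 4).map (fun t => (t, "jump")) ++ ((pvB vocab 5).map (fun t => (t, "push"))
        ++ ((pvB vocab 6).map (fun t => (t, "mov")) ++ (pvB vocab 7).map (fun t => (t, "num")))))))) := by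
  unfold part2_stem_alt
  have hinit : ((PySem.Set.empty : PySem.Set String), pvCats.map (fun _ => ([] : List String)))
      = pvSt [] := by
    simp [pvSt, pvB, pvCats, PySem.Set.empty, PySem.Set.ofList]
  rw [hinit, pvLoop vocab []]
  simp only [List.nil_append]
  have hzip : pvCats.zip (pvSt vocab).2
      = [(("add", fun t => PySem.Str.isIn "add" t), pvB vocab 0),
         (("sub", fun t => PySem.Str.isIn "sub" t), pvB vocab 1),
         (("mul", fun t => PySem.Str.isIn "mul" t), pvB vocab 2),
         (("div", fun t => PySem.Str.isIn "div" t), pvB vocab 3),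
         (("jump", fun t => PySem.Str.startswith t "j"), pvB vocab 4),
         (("push", fun t => PySem.Str.isIn "push" t), pvB vocab 5),
         (("mov", fun t => PySem.Str.isIn "mov" t), pvB vocab 6),
         (("num", fun t => PySem.Str.strIsdigit t), pvB vocab 7)] := by
    simp [pvCats, pvSt, List.zip]
  rw [hzip, fold_zip_items _ _ ?hnd]
  case hnd =>
    have := pvB_flat_nodup vocab [0, 1, 2, 3, 4, 5, 6, 7] (by decide)
    simpa [PySem.Dict.keys_empty, List.flatMap_cons] using this
  simp [List.flatMap_cons, show (PySem.Dict.empty : PySem.Dict String String).items = [] from rfl]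

-- the interchange ------------------------------------------------------------
set_option maxHeartbeats 1000000 in
lemma keys_split (vocab : List String) :
    PySem.List.dedup
        (vocab.filter (fun term => PySem.Str.isIn "add" term)
          ++ (vocab.filter (fun term => PySem.Str.isIn "sub" term)
          ++ (vocab.filter (fun term => PySem.Str.isIn "mul" term)
          ++ (vocab.filter (fun term => PySem.Str.isIn "div" term)
          ++ (vocab.filter (fun term => PySem.Str.startswith term "j")
          ++ (vocab.filter (fun term => PySem.Str.isIn "push" term)
          ++ (vocab.filter (fun term => PySem.Str.isIn "mov" term)
          ++ vocab.filter (fun term => PySem.Str.strIsdigit term))))))))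
      = pvB vocab 0 ++ (pvB vocab 1 ++ (pvB vocab 2 ++ (pvB vocab 3 ++ (pvB vocab 4
          ++ (pvB vocab 5 ++ (pvB vocab 6 ++ pvB vocab 7)))))) := by
  have hmem : ∀ (ps : List (String → Bool)) (x : String),
      x ∈ ps.flatMap (fun p => vocab.filter p) → x ∈ vocab := by
    intro ps x hx
    rcases List.mem_flatMap.1 hx with ⟨p, -, hxp⟩
    exact (List.mem_filter.1 hxp).1
  rw [← List.filter_true (l := PySem.List.dedup
        (vocab.filter (fun term => PySem.Str.isIn "add" term)
          ++ (vocab.filter (fun term => PySem.Str.isIn "sub" term)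
          ++ (vocab.filter (fun term => PySem.Str.isIn "mul" term)
          ++ (vocab.filter (fun term => PySem.Str.isIn "div" term)
          ++ (vocab.filter (fun term => PySem.Str.startswith term "j")
          ++ (vocab.filter (fun term => PySem.Str.isIn "push" term)
          ++ (vocab.filter (fun term => PySem.Str.isIn "mov" term)
          ++ vocab.filter (fun term => PySem.Str.strIsdigit term)))))))))]
  rw [pvPeel vocab _ _ _ (by
    intro x hx
    exact hmem [(fun term => PySem.Str.isIn "sub" term), (fun term => PySem.Str.isIn "mul" term),
      (fun term => PySem.Str.isIn "div" term), (fun term => PySem.Str.startswith term "j"),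
      (fun term => PySem.Str.isIn "push" term), (fun term => PySem.Str.isIn "mov" term),
      (fun term => PySem.Str.strIsdigit term)] x (by simpa [List.flatMap_cons] using hx))]
  rw [pvPeel vocab _ _ _ (by
    intro x hx
    exact hmem [(fun term => PySem.Str.isIn "mul" term),
      (fun term => PySem.Str.isIn "div" term), (fun term => PySem.Str.startswith term "j"),
      (fun term => PySem.Str.isIn "push" term), (fun term => PySem.Str.isIn "mov" term),
      (fun term => PySem.Str.strIsdigit term)] x (by simpa [List.flatMap_cons] using hx))]
  rw [pvPeel vocab _ _ _ (by
    intro x hx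
    exact hmem [(fun term => PySem.Str.isIn "div" term), (fun term => PySem.Str.startswith term "j"),
      (fun term => PySem.Str.isIn "push" term), (fun term => PySem.Str.isIn "mov" term),
      (fun term => PySem.Str.strIsdigit term)] x (by simpa [List.flatMap_cons] using hx))]
  rw [pvPeel vocab _ _ _ (by
    intro x hx
    exact hmem [(fun term => PySem.Str.startswith term "j"),
      (fun term => PySem.Str.isIn "push" term), (fun term => PySem.Str.isIn "mov" term),
      (fun term => PySem.Str.strIsdigit term)] x (by simpa [List.flatMap_cons] using hx))]
  rw [pvPeel vocab _ _ _ (by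
    intro x hx
    exact hmem [(fun term => PySem.Str.isIn "push" term), (fun term => PySem.Str.isIn "mov" term),
      (fun term => PySem.Str.strIsdigit term)] x (by simpa [List.flatMap_cons] using hx))]
  rw [pvPeel vocab _ _ _ (by
    intro x hx
    exact hmem [(fun term => PySem.Str.isIn "mov" term),
      (fun term => PySem.Str.strIsdigit term)] x (by simpa [List.flatMap_cons] using hx))]
  rw [pvPeel vocab _ _ _ (by
    intro x hx
    exact hmem [(fun term => PySem.Str.strIsdigit term)] x (by simpa [List.flatMap_cons] using hx))]
  rw [dedup_filter, List.filter_filter]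
  simp only [pvB]
  congr 1
  · exact List.filter_congr (fun t _ => by unfold pvFirst?; split_ifs <;> simp_all [pvP])
  congr 1
  · exact List.filter_congr (fun t _ => by unfold pvFirst?; split_ifs <;> simp_all [pvP])
  congr 1
  · exact List.filter_congr (fun t _ => by unfold pvFirst?; split_ifs <;> simp_all [pvP])
  congr 1
  · exact List.filter_congr (fun t _ => by unfold pvFirst?; split_ifs <;> simp_all [pvP])
  congr 1
  · exact List.filter_congr (fun t _ => by unfold pvFirst?; split_ifs <;> simp_all [pvP])
  congr 1
  · exact List.filter_congr (fun t _ => by unfold pvFirst?; split_ifs <;> simp_all [pvP])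
  congr 1
  · exact List.filter_congr (fun t _ => by unfold pvFirst?; split_ifs <;> simp_all [pvP])
  · exact List.filter_congr (fun t _ => by unfold pvFirst?; split_ifs <;> simp_all [pvP])

lemma pvVal_of_first (vocab : List String) (k : String) (hkv : k ∈ vocab)
    (hpre : pvCnt k ≤ 1) (i : Nat) (hf : pvFirst? k = some i) :
    pvVal vocab k = pvName i := by
  unfold pvFirst? at hf
  split_ifs at hf with h0 h1 h2 h3 h4 h5 h6 h7 <;> cases hf <;>
    (simp only [pvCnt] at hpre
     split_ifs at hpre <;> simp_all [pvVal, pvName, pvP, List.mem_filter])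

theorem part2_stem_eq (vocab : List String) (hpre : Pre_part2_stem vocab) :
    part2_stem vocab = part2_stem_alt vocab := by
  rw [A_norm, B_norm, keys_split]
  simp only [List.map_append]
  unfold Pre_part2_stem at hpre
  congr 1
  · refine List.map_congr_left ?_
    intro k hk
    have hkd := List.mem_filter.1 hk
    have hkv : k ∈ vocab := (PySem.List.mem_dedup vocab k).1 hkd.1
    have hfk : pvFirst? k = some 0 := by simpa using hkd.2
    simp [pvVal_of_first vocab k hkv (hpre k hkv) 0 hfk, pvName]
  congr 1
  · refine List.map_congr_left ?_
    intro k hk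
    have hkd := List.mem_filter.1 hk
    have hkv : k ∈ vocab := (PySem.List.mem_dedup vocab k).1 hkd.1
    have hfk : pvFirst? k = some 1 := by simpa using hkd.2
    simp [pvVal_of_first vocab k hkv (hpre k hkv) 1 hfk, pvName]
  congr 1
  · refine List.map_congr_left ?_
    intro k hk
    have hkd := List.mem_filter.1 hk
    have hkv : k ∈ vocab := (PySem.List.mem_dedup vocab k).1 hkd.1
    have hfk : pvFirst? k = some 2 := by simpa using hkd.2
    simp [pvVal_of_first vocab k hkv (hpre k hkv) 2 hfk, pvName]
  congr 1
  · refine List.map_congr_left ?_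
    intro k hk
    have hkd := List.mem_filter.1 hk
    have hkv : k ∈ vocab := (PySem.List.mem_dedup vocab k).1 hkd.1
    have hfk : pvFirst? k = some 3 := by simpa using hkd.2
    simp [pvVal_of_first vocab k hkv (hpre k hkv) 3 hfk, pvName]
  congr 1
  · refine List.map_congr_left ?_
    intro k hk
    have hkd := List.mem_filter.1 hk
    have hkv : k ∈ vocab := (PySem.List.mem_dedup vocab k).1 hkd.1
    have hfk : pvFirst? k = some 4 := by simpa using hkd.2
    simp [pvVal_of_first vocab k hkv (hpre k hkv) 4 hfk, pvName]
  congr 1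
  · refine List.map_congr_left ?_
    intro k hk
    have hkd := List.mem_filter.1 hk
    have hkv : k ∈ vocab := (PySem.List.mem_dedup vocab k).1 hkd.1
    have hfk : pvFirst? k = some 5 := by simpa using hkd.2
    simp [pvVal_of_first vocab k hkv (hpre k hkv) 5 hfk, pvName]
  congr 1
  · refine List.map_congr_left ?_
    intro k hk
    have hkd := List.mem_filter.1 hk
    have hkv : k ∈ vocab := (PySem.List.mem_dedup vocab k).1 hkd.1
    have hfk : pvFirst? k = some 6 := by simpa using hkd.2
    simp [pvVal_of_first vocab k hkv (hpre k hkv) 6 hfk, pvName]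
  · refine List.map_congr_left ?_
    intro k hk
    have hkd := List.mem_filter.1 hk
    have hkv : k ∈ vocab := (PySem.List.mem_dedup vocab k).1 hkd.1
    have hfk : pvFirst? k = some 7 := by simpa using hkd.2
    simp [pvVal_of_first vocab k hkv (hpre k hkv) 7 hfk, pvName]

-- ===== VERDICT (by name: the statement is the Claim_ definition above) =====
theorem part2_stem_spec : Claim_equal_part2_stem := by
  intro vocab _ hpre
  unfold Spec_part2_stem
  exact (part2_stem_eq vocab hpre).symm ▸ rfl
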